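-- pv_equiv track=rewrite | github.com/smealum/aemstro | aemstro.py | getInputSymbolFromString
-- ===== SOURCE A (Python) =====
-- def getInputSymbolFromString(src, vt, ut, idx):
-- 	idxstr=""
--
-- 	if idx==1:
-- 		idxstr="[idx1]"
-- 	elif idx==2:
-- 		idxstr="[idx2]"
-- 	elif idx==3:
-- 		idxstr="[lcnt]"
--
-- 	if src in vt:
-- 		return vt[src]+idxstr
-- 	if src in ut:
-- 		return ut[src]+idxstr
-- 	else:
-- 		f=src.find(".")
-- 		if f>=0:
-- 			src=getInputSymbolFromString(src[:f], vt, ut, idx)+src[f:]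
-- 			idxstr=""
-- 		return src+idxstr
-- ===== SOURCE B (Python) =====
-- def getInputSymbolFromString(src, vt, ut, idx):
--     # Flat, non-recursive form: the prefix before the first '.' can never
--     # contain a '.', so A's self-recursion always resolves in one step.
--     idxstr = "[idx1]" if idx == 1 else "[idx2]" if idx == 2 else "[lcnt]" if idx == 3 else ""
--     if src in vt:
--         return vt[src] + idxstr
--     if src in ut:
--         return ut[src] + idxstr
--     f = src.find(".")
--     if f < 0:
--         return src + idxstr
--     p = src[:f]
--     base = vt[p] if p in vt else ut[p] if p in ut else p
--     return base + idxstr + src[f:]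
-- ===== Notes on version B (the rewrite author's own statement) =====
-- stated objective: simpler
-- what changed: Replaced A's self-recursion with a flat single-pass decomposition: since the prefix before the first '.' cannot contain a dot, the recursive call is resolved inline as one dictionary-lookup chain, giving a non-recursive early-return function.
import Mathlib
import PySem

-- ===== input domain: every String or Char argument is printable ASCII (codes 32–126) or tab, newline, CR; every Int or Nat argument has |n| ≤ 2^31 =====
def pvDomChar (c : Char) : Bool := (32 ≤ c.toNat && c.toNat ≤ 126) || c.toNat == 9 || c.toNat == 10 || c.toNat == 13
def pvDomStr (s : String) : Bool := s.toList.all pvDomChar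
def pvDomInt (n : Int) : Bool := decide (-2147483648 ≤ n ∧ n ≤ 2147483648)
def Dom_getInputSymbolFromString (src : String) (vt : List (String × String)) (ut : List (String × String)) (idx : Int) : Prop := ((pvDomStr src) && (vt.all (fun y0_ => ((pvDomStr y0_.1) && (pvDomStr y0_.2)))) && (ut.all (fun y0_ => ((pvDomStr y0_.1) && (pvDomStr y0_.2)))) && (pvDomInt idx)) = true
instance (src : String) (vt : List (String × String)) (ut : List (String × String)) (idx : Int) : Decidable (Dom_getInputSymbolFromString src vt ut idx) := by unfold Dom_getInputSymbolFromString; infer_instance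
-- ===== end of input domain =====

-- B replaces A's self-recursion by a flat lookup chain (the prefix before the first '.' never
-- contains a dot, so the recursion always resolves in one step); objective: simpler.

-- the prefix of src strictly before its first '.' is shorter than src (termination of port A)
theorem pv_slice_len_lt (src : String) (h : 0 ≤ PySem.Str.find src ".") :
    (PySem.Str.slice src none (some (PySem.Str.find src "."))).length < src.length := by
  have hf : PySem.Str.find src "." = PySem.Chars.find src.toList ['.'] := by
    simp [PySem.Str.find_eq]
  have h0 : 0 ≤ PySem.Chars.find src.toList ['.'] := hf ▸ h
  obtain ⟨hpre, -⟩ := PySem.Chars.find_spec h0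
  have hlt : (PySem.Chars.find src.toList ['.']).toNat < src.toList.length := by
    by_contra hge
    rw [List.drop_eq_nil_of_le (by omega)] at hpre
    exact absurd (List.prefix_nil.mp hpre) (by simp)
  have hl : (PySem.Str.slice src none (some (PySem.Str.find src "."))).toList
      = src.toList.take (PySem.Chars.find src.toList ['.']).toNat := by
    rw [PySem.Str.toList_slice, PySem.Chars.slice_eq_listSlice, hf,
      PySem.List.slice_to src.toList h0]
  have := congrArg List.length hl
  rw [String.length_toList, List.length_take] at this
  rw [this, ← String.length_toList (s := src)]
  omega

-- ===== PORT A =====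
def getInputSymbolFromString (src : String) (vt : List (String × String)) (ut : List (String × String)) (idx : Int) : String :=
  let idxstr : String :=
    if idx = 1 then "[idx1]" else if idx = 2 then "[idx2]" else if idx = 3 then "[lcnt]" else ""
  match (PySem.Dict.mk vt).get? src with
  | some v => v ++ idxstr
  | none =>
    match (PySem.Dict.mk ut).get? src with
    | some v => v ++ idxstr
    | none =>
      let f := PySem.Str.find src "."
      if h : 0 ≤ f then
        (getInputSymbolFromString (PySem.Str.slice src none (some f)) vt ut idx
          ++ PySem.Str.slice src (some f) none)
      else
        src ++ idxstr
termination_by src.length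
decreasing_by exact pv_slice_len_lt src h

-- ===== PORT B =====
def getInputSymbolFromString_alt (src : String) (vt : List (String × String)) (ut : List (String × String)) (idx : Int) : String :=
  let idxstr : String :=
    if idx = 1 then "[idx1]" else if idx = 2 then "[idx2]" else if idx = 3 then "[lcnt]" else ""
  match (PySem.Dict.mk vt).get? src with
  | some v => v ++ idxstr
  | none =>
    match (PySem.Dict.mk ut).get? src with
    | some v => v ++ idxstr
    | none =>
      let f := PySem.Str.find src "."
      if 0 ≤ f then
        let p := PySem.Str.slice src none (some f)
        let base : String :=
          match (PySem.Dict.mk vt).get? p with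
          | some v => v
          | none =>
            match (PySem.Dict.mk ut).get? p with
            | some v => v
            | none => p
        base ++ idxstr ++ PySem.Str.slice src (some f) none
      else
        src ++ idxstr

-- ===== PRECONDITION & SPEC =====
def Spec_getInputSymbolFromString (src : String) (vt : List (String × String)) (ut : List (String × String)) (idx : Int) (out : String) : Prop := out = getInputSymbolFromString_alt src vt ut idx
instance (src : String) (vt : List (String × String)) (ut : List (String × String)) (idx : Int) (out : String) : Decidable (Spec_getInputSymbolFromString src vt ut idx out) := by unfold Spec_getInputSymbolFromString; infer_instance

-- ===== CLAIM (what is proved, stated in full; the proofs are below) =====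
def Claim_equal_getInputSymbolFromString : Prop := ∀ (src : String) (vt : List (String × String)) (ut : List (String × String)) (idx : Int), Dom_getInputSymbolFromString src vt ut idx → Spec_getInputSymbolFromString src vt ut idx (getInputSymbolFromString src vt ut idx)

-- ===== LEMMAS AND PROOFS =====

-- the prefix strictly before the FIRST '.' contains no '.'
theorem pv_find_slice_neg (src : String) (h : 0 ≤ PySem.Str.find src ".") :
    PySem.Str.find (PySem.Str.slice src none (some (PySem.Str.find src "."))) "." = -1 := by
  have hf : PySem.Str.find src "." = PySem.Chars.find src.toList ['.'] := by
    simp [PySem.Str.find_eq]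
  have h0 : 0 ≤ PySem.Chars.find src.toList ['.'] := hf ▸ h
  obtain ⟨-, hmin⟩ := PySem.Chars.find_spec h0
  have htake : (PySem.Str.slice src none (some (PySem.Str.find src "."))).toList
      = src.toList.take (PySem.Chars.find src.toList ['.']).toNat := by
    rw [PySem.Str.toList_slice, PySem.Chars.slice_eq_listSlice, hf,
      PySem.List.slice_to src.toList h0]
  rw [PySem.Str.find_eq, htake]
  rw [show (".".toList) = ['.'] from rfl]
  rw [PySem.Chars.find_eq_neg_one_iff]
  intro hinf
  have hmem : '.' ∈ src.toList.take (PySem.Chars.find src.toList ['.']).toNat := by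
    obtain ⟨s, t, hst⟩ := hinf
    rw [← hst]; simp
  obtain ⟨j, hj, hgj⟩ := List.getElem_of_mem hmem
  have hjk : j < (PySem.Chars.find src.toList ['.']).toNat := by
    rw [List.length_take] at hj; omega
  have hjl : j < src.toList.length := by
    rw [List.length_take] at hj; omega
  have hgj' : src.toList[j]'hjl = '.' := by rw [← hgj, List.getElem_take]
  refine hmin j hjk ?_
  rw [List.drop_eq_getElem_cons hjl, hgj']
  exact ⟨src.toList.drop (j + 1), rfl⟩

-- ===== VERDICT (by name: the statement is the Claim_ definition above) =====
theorem getInputSymbolFromString_spec : Claim_equal_getInputSymbolFromString := by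
  intro src vt ut idx _
  unfold Spec_getInputSymbolFromString
  rw [getInputSymbolFromString, getInputSymbolFromString_alt]
  cases hvt : (PySem.Dict.mk vt).get? src with
  | some v => simp
  | none =>
    cases hut : (PySem.Dict.mk ut).get? src with
    | some v => simp
    | none =>
      simp only
      by_cases h : 0 ≤ PySem.Str.find src "."
      · rw [dif_pos h, if_pos h]
        -- resolve the recursive call on the dot-free prefix in one step
        rw [getInputSymbolFromString]
        cases hvt' : (PySem.Dict.mk vt).get? (PySem.Str.slice src none (some (PySem.Str.find src "."))) with
        | some v => simp [String.append_assoc]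
        | none =>
          cases hut' : (PySem.Dict.mk ut).get? (PySem.Str.slice src none (some (PySem.Str.find src "."))) with
          | some v => simp [String.append_assoc]
          | none =>
            simp only
            rw [dif_neg (by rw [pv_find_slice_neg src h]; norm_num)]
      · rw [dif_neg h, if_neg h]
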